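-- pv_equiv track=rewrite | github.com/jkim439/Coding-Test | Programmers/레벨2/118667.py | solution
-- ===== SOURCE A (Python) =====
-- from collections import deque
--
-- def solution(queue1, queue2):
--     deque1, deque2 = deque(queue1), deque(queue2)
--     sum1, sum2 = sum(deque1), sum(deque2)
--     for i in range(300000):
--         if sum1 == sum2:
--             return i
--         elif sum1 > sum2:
--             num = deque1.popleft()
--             deque2.append(num)
--             sum1 -= num
--             sum2 += num
--         else:
--             num = deque2.popleft()
--             deque1.append(num)
--             sum2 -= num
--             sum1 += num
--     return -1
-- ===== SOURCE B (Python) =====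
-- def solution(queue1, queue2):
--     arr = list(queue1) + list(queue2)
--     N = len(arr)
--     sum1, sum2 = sum(queue1), sum(queue2)
--     l, r = 0, len(queue1)
--     for steps in range(300000):
--         if sum1 == sum2:
--             return steps
--         if sum1 > sum2:
--             v = arr[l % N]
--             sum1 -= v
--             sum2 += v
--             l += 1
--         else:
--             v = arr[r % N]
--             sum1 += v
--             sum2 -= v
--             r += 1
--     return -1
-- ===== Notes on version B (the rewrite author's own statement) =====
-- stated objective: alternative
-- what changed: Replaces the two mutating deques by a sliding window (two indices l,r taken modulo N plus maintained sums) over one fixed concatenated array, so no element is ever moved.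
-- outside the precondition, e.g. on solution([-1], [-1]): A returns 0, B returns 0
import Mathlib
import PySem

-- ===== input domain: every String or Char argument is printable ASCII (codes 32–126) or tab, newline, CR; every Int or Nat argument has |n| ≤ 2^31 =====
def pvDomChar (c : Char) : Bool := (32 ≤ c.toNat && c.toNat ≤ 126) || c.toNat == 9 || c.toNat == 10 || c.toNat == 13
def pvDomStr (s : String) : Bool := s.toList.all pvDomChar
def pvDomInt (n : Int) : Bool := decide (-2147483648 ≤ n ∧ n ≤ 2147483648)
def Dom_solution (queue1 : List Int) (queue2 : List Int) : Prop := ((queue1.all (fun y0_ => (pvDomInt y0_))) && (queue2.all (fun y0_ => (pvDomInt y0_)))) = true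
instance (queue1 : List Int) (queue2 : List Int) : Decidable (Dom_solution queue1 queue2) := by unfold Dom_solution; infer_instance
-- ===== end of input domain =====

-- B replaces A's two mutating deques by a sliding window (two indices + maintained sums) over one fixed circular array; objective: alternative decomposition, same cost.

-- ===== PORT A =====
-- A's loop: two deques, popleft/append; the empty-popleft (Python IndexError) is excluded by Pre_ below.
def solLoopA : Nat → Int → List Int → List Int → Int → Int → Int
  | 0, _, _, _, _, _ => -1
  | fuel + 1, i, d1, d2, s1, s2 =>
    if s1 = s2 then i
    else if s1 > s2 then
      match d1 with
      | [] => -1  -- Python raises IndexError here; outside Pre_solution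
      | x :: t => solLoopA fuel (i + 1) t (d2 ++ [x]) (s1 - x) (s2 + x)
    else
      match d2 with
      | [] => -1  -- Python raises IndexError here; outside Pre_solution
      | y :: t => solLoopA fuel (i + 1) (d1 ++ [y]) t (s1 + y) (s2 - y)

def solution (queue1 : List Int) (queue2 : List Int) : Int :=
  solLoopA 300000 0 queue1 queue2 queue1.sum queue2.sum

-- ===== PORT B =====
-- B's loop: fixed array arr, window [l, r) taken modulo N, only sums maintained.
def solLoopB (arr : List Int) (N : Nat) : Nat → Int → Nat → Nat → Int → Int → Int
  | 0, _, _, _, _, _ => -1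
  | fuel + 1, steps, l, r, s1, s2 =>
    if s1 = s2 then steps
    else if s1 > s2 then
      let v := arr.getD (l % N) 0
      solLoopB arr N fuel (steps + 1) (l + 1) r (s1 - v) (s2 + v)
    else
      let v := arr.getD (r % N) 0
      solLoopB arr N fuel (steps + 1) l (r + 1) (s1 + v) (s2 - v)

def solution_alt (queue1 : List Int) (queue2 : List Int) : Int :=
  let arr := queue1 ++ queue2
  solLoopB arr arr.length 300000 0 0 queue1.length queue1.sum queue2.sum

-- ===== PRECONDITION & SPEC =====
-- Pre_ excludes inputs with a negative total sum: on those A can popleft from an empty deque and raise IndexError mid-loop.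
def Pre_solution (queue1 : List Int) (queue2 : List Int) : Prop :=
  0 ≤ queue1.sum + queue2.sum
instance (queue1 : List Int) (queue2 : List Int) : Decidable (Pre_solution queue1 queue2) := by
  unfold Pre_solution; infer_instance

def pvWitness_solution : List Int × List Int := ([1], [1, 1])

def Spec_solution (queue1 : List Int) (queue2 : List Int) (out : Int) : Prop := out = solution_alt queue1 queue2
instance (queue1 : List Int) (queue2 : List Int) (out : Int) : Decidable (Spec_solution queue1 queue2 out) := by unfold Spec_solution; infer_instance

-- ===== CLAIM (what is proved, stated in full; the proofs are below) =====
def Claim_equal_solution : Prop := ∀ (queue1 : List Int) (queue2 : List Int), Dom_solution queue1 queue2 → Pre_solution queue1 queue2 → Spec_solution queue1 queue2 (solution queue1 queue2)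

-- ===== LEMMAS AND PROOFS =====

theorem sum_rotate_int (arr : List Int) (n : Nat) : (arr.rotate n).sum = arr.sum :=
  (List.rotate_perm arr n).sum_eq

-- Reading the circular array at offset k from l equals reading the rotated list at k.
theorem rot_getD (arr : List Int) (l k : Nat) (hk : k < arr.length) :
    arr.getD ((l + k) % arr.length) 0 = (arr.rotate (l % arr.length)).getD k 0 := by
  have hN : 0 < arr.length := Nat.lt_of_le_of_lt (Nat.zero_le k) hk
  rw [List.getD_eq_getElem _ _ (Nat.mod_lt _ hN),
      List.getD_eq_getElem _ _ (by rw [List.length_rotate]; exact hk),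
      List.getElem_rotate]
  congr 1
  rw [Nat.add_mod_mod k l, Nat.add_comm k l]

-- Invariant: d1 ++ d2 is arr rotated by l, B's r equals l + |d1|, and the carried sums
-- are the true deque sums; then the two loops agree step for step.
theorem loop_eq (fuel : Nat) (i : Int) (arr : List Int) (htot : 0 ≤ arr.sum) :
    ∀ (d1 d2 : List Int) (l : Nat),
    d1 ++ d2 = arr.rotate (l % arr.length) →
    solLoopA fuel i d1 d2 d1.sum d2.sum =
      solLoopB arr arr.length fuel i l (l + d1.length) d1.sum d2.sum := by
  induction fuel generalizing i with
  | zero => intro d1 d2 l _; rfl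
  | succ fuel ih =>
    intro d1 d2 l hrot
    have hsum : d1.sum + d2.sum = arr.sum := by
      have := congrArg List.sum hrot
      simpa [sum_rotate_int] using this
    have hlen : d1.length + d2.length = arr.length := by
      have := congrArg List.length hrot
      simpa [List.length_rotate] using this
    by_cases heq : d1.sum = d2.sum
    · simp [solLoopA, solLoopB, heq]
    · by_cases hgt : d1.sum > d2.sum
      · -- A pops d1's head; B advances l
        cases d1 with
        | nil => exfalso; simp at hsum hgt; omega
        | cons x t =>
          have hN : 0 < arr.length := by simp at hlen; omega
          have hv : arr.getD (l % arr.length) 0 = x := by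
            have := rot_getD arr l 0 hN
            rw [← hrot] at this
            simpa using this
          have hrot' : t ++ (d2 ++ [x]) = arr.rotate ((l + 1) % arr.length) := by
            have h1 : arr.rotate ((l + 1) % arr.length)
                = (arr.rotate (l % arr.length)).rotate 1 := by
              rw [List.rotate_rotate, List.rotate_mod,
                  ← List.rotate_mod arr (l % arr.length + 1), Nat.mod_add_mod,
                  List.rotate_mod]
            rw [h1, ← hrot]
            rw [show (x :: t) ++ d2 = x :: (t ++ d2) from rfl,
                show (1:Nat) = 0+1 from rfl, List.rotate_cons_succ, List.rotate_zero,
                List.append_assoc]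
          have hstep := ih (i + 1) t (d2 ++ [x]) (l + 1) hrot'
          simp only [solLoopA, solLoopB, if_neg heq, if_pos hgt, hv]
          have e1 : (x :: t).sum - x = t.sum := by simp
          have e2 : d2.sum + x = (d2 ++ [x]).sum := by simp
          have e3 : l + (x :: t).length = (l + 1) + t.length := by simp; omega
          rw [e1, e2, e3, hstep]
      · -- A pops d2's head; B advances r
        have hlt : d1.sum < d2.sum := by omega
        cases d2 with
        | nil => exfalso; simp at hsum hlt; omega
        | cons y t2 =>
          have hN : 0 < arr.length := by simp at hlen; omega
          have hk : d1.length < arr.length := by simp at hlen; omega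
          have hv : arr.getD ((l + d1.length) % arr.length) 0 = y := by
            have := rot_getD arr l d1.length hk
            rw [← hrot] at this
            simpa [List.getD_eq_getElem?_getD] using this
          have hrot' : (d1 ++ [y]) ++ t2 = arr.rotate (l % arr.length) := by
            rw [List.append_assoc]; exact hrot
          have hstep := ih (i + 1) (d1 ++ [y]) t2 l hrot'
          simp only [solLoopA, solLoopB, if_neg heq, if_neg hgt, hv]
          have e1 : d1.sum + y = (d1 ++ [y]).sum := by simp
          have e2 : (y :: t2).sum - y = t2.sum := by simp
          have e3 : l + (d1 ++ [y]).length = l + d1.length + 1 := by simp; omega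
          rw [e1, e2, ← e3, hstep]

-- ===== VERDICT (by name: the statement is the Claim_ definition above) =====
theorem solution_spec : Claim_equal_solution := by
  intro q1 q2 _ hpre
  unfold Spec_solution solution solution_alt
  have htot : 0 ≤ (q1 ++ q2).sum := by simpa using hpre
  have hrot : q1 ++ q2 = (q1 ++ q2).rotate (0 % (q1 ++ q2).length) := by
    simp
  simpa using loop_eq 300000 0 (q1 ++ q2) htot q1 q2 0 hrot
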